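-- pv_equiv track=rewrite | github.com/bcgov/ols-devkit | alm/batch_address_list_metrics.py | faultCountAndHighScore
-- ===== SOURCE A (Python) =====
-- def faultCountAndHighScore(faultList, scoreList):
--     # Count the number of times a result has multiple
--     # faults (0, 1, 2, etc).
--     ct = noF = oneF = twoF = threeF = fourF = fiveF = 0
--     aboveFiveF = threeFaultsAndHS = fourFaultsAndHS = 0
--     fiveFaultsAndHS = aboveFiveFaultsAndHS = 0
--     for i in faultList:
--         if faultList[ct].count(":") == 0:
--             noF += 1
--         elif faultList[ct].count(":") == 1:
--             oneF += 1
--         elif faultList[ct].count(":") == 2: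
--             twoF += 1
--         elif faultList[ct].count(":") == 3:
--             threeF += 1
--             if (scoreList[ct]) >= 90:
--                 threeFaultsAndHS += 1
--         elif faultList[ct].count(":") == 4:
--             fourF += 1
--             if (scoreList[ct]) >= 90:
--                 fourFaultsAndHS += 1
--         elif faultList[ct].count(":") == 5:
--             fiveF += 1
--             if (scoreList[ct]) >= 90:
--                 fiveFaultsAndHS += 1
--         elif faultList[ct].count(":") > 5:
--             aboveFiveF += 1
--             if (scoreList[ct]) >= 90:
--                 aboveFiveFaultsAndHS += 1
--         ct += 1
--
--     return (
--         noF,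
--         oneF,
--         twoF,
--         threeF,
--         fourF,
--         fiveF,
--         aboveFiveF,
--         threeFaultsAndHS,
--         fourFaultsAndHS,
--         fiveFaultsAndHS,
--         aboveFiveFaultsAndHS,
--     )
-- ===== SOURCE B (Python) =====
-- def faultCountAndHighScore(faultList, scoreList):
--     buckets = [min(f.count(":"), 6) for f in faultList]
--     pairs = list(zip(buckets, scoreList))
--     counts = tuple(buckets.count(k) for k in range(7))
--     highs = tuple(sum(1 for b, s in pairs if b == k and s >= 90) for k in range(3, 7))
--     return counts + highs
-- ===== Notes on version B (the rewrite author's own statement) =====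
-- stated objective: simpler
-- what changed: Replaces A's single pass with 11 named scalar accumulators and a 7-way if/elif chain by a staged, accumulator-free computation: materialise the clamped bucket list once, then obtain each of the 7 counts with list.count and each of the 4 high-score tallies as a filtered sum over zip(buckets, scoreList).
import Mathlib
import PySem

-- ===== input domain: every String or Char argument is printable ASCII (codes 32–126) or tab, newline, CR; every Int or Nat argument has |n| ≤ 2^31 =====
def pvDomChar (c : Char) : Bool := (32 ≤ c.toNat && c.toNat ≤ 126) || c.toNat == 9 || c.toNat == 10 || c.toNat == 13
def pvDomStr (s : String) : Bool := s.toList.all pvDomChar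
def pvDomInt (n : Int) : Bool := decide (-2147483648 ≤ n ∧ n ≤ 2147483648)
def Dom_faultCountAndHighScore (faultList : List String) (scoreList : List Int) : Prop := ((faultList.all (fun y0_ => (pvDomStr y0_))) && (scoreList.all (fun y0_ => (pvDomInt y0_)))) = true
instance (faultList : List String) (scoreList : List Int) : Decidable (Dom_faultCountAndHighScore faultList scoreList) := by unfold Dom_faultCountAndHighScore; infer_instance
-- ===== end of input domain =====

-- B replaces A's single-pass 11-accumulator if/elif chain by staged passes: a clamped
-- bucket list built once, then list.count per bucket and filtered sums over
-- zip(buckets, scoreList) for the high-score tallies (objective: simpler).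


-- ===== PORT A =====
-- A's loop: 'for i in faultList' with a hand-kept counter ct, indexing faultList[ct]
-- and (in the >=3-colon branches) scoreList[ct]; the 11 scalar counters are the state.
-- scoreList[ct] is PySem.List.pyGetD with default 0; Pre_ excludes the IndexError inputs.
def pvALoop (faultList : List String) (scoreList : List Int) :
    List String → Int → Int → Int → Int → Int → Int → Int → Int → Int → Int → Int → Int →
    Int × Int × Int × Int × Int × Int × Int × Int × Int × Int × Int
  | [], _, noF, oneF, twoF, threeF, fourF, fiveF, aboveF, hs3, hs4, hs5, hs6 =>
    (noF, oneF, twoF, threeF, fourF, fiveF, aboveF, hs3, hs4, hs5, hs6)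
  | _ :: rest, ct, noF, oneF, twoF, threeF, fourF, fiveF, aboveF, hs3, hs4, hs5, hs6 =>
    let c := PySem.Str.count (PySem.List.pyGetD faultList ct "") ":"
    if c = 0 then
      pvALoop faultList scoreList rest (ct + 1) (noF + 1) oneF twoF threeF fourF fiveF aboveF hs3 hs4 hs5 hs6
    else if c = 1 then
      pvALoop faultList scoreList rest (ct + 1) noF (oneF + 1) twoF threeF fourF fiveF aboveF hs3 hs4 hs5 hs6
    else if c = 2 then
      pvALoop faultList scoreList rest (ct + 1) noF oneF (twoF + 1) threeF fourF fiveF aboveF hs3 hs4 hs5 hs6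
    else if c = 3 then
      let hs3 := if PySem.List.pyGetD scoreList ct 0 ≥ 90 then hs3 + 1 else hs3
      pvALoop faultList scoreList rest (ct + 1) noF oneF twoF (threeF + 1) fourF fiveF aboveF hs3 hs4 hs5 hs6
    else if c = 4 then
      let hs4 := if PySem.List.pyGetD scoreList ct 0 ≥ 90 then hs4 + 1 else hs4
      pvALoop faultList scoreList rest (ct + 1) noF oneF twoF threeF (fourF + 1) fiveF aboveF hs3 hs4 hs5 hs6
    else if c = 5 then
      let hs5 := if PySem.List.pyGetD scoreList ct 0 ≥ 90 then hs5 + 1 else hs5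
      pvALoop faultList scoreList rest (ct + 1) noF oneF twoF threeF fourF (fiveF + 1) aboveF hs3 hs4 hs5 hs6
    else if c > 5 then
      let hs6 := if PySem.List.pyGetD scoreList ct 0 ≥ 90 then hs6 + 1 else hs6
      pvALoop faultList scoreList rest (ct + 1) noF oneF twoF threeF fourF fiveF (aboveF + 1) hs3 hs4 hs5 hs6
    else
      pvALoop faultList scoreList rest (ct + 1) noF oneF twoF threeF fourF fiveF aboveF hs3 hs4 hs5 hs6

def faultCountAndHighScore (faultList : List String) (scoreList : List Int) : Int × Int × Int × Int × Int × Int × Int × Int × Int × Int × Int :=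
  pvALoop faultList scoreList faultList 0 0 0 0 0 0 0 0 0 0 0 0

-- ===== PORT B =====
-- B's stages: buckets = [min(f.count(":"), 6) for f in faultList]; pairs = zip(buckets,
-- scoreList); counts(k) = buckets.count(k); highs(k) = sum(1 for b,s in pairs if b == k
-- and s >= 90); returned as the 11-tuple.
def pvBuckets (faultList : List String) : List Int :=
  faultList.map (fun f => min ((PySem.Str.count f ":" : Int)) 6)

-- 'sum(1 for b, s in pairs if b == k and s >= 90)'
def pvHighSum (pairs : List (Int × Int)) (k : Int) : Int :=
  pairs.foldl (fun acc p => if p.1 = k ∧ p.2 ≥ 90 then acc + 1 else acc) 0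

def faultCountAndHighScore_alt (faultList : List String) (scoreList : List Int) : Int × Int × Int × Int × Int × Int × Int × Int × Int × Int × Int :=
  let buckets := pvBuckets faultList
  let pairs := buckets.zip scoreList
  ((PySem.List.count buckets 0 : Int), (PySem.List.count buckets 1 : Int),
   (PySem.List.count buckets 2 : Int), (PySem.List.count buckets 3 : Int),
   (PySem.List.count buckets 4 : Int), (PySem.List.count buckets 5 : Int),
   (PySem.List.count buckets 6 : Int),
   pvHighSum pairs 3, pvHighSum pairs 4, pvHighSum pairs 5, pvHighSum pairs 6)

-- ===== PRECONDITION & SPEC =====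
-- Pre_ excludes exactly the inputs where Python A raises IndexError: some element with
-- at least 3 colons sits at an index beyond the end of scoreList.
def Pre_faultCountAndHighScore (faultList : List String) (scoreList : List Int) : Prop :=
  ∀ i ∈ List.range faultList.length,
    3 ≤ PySem.Str.count (faultList.getD i "") ":" → i < scoreList.length
instance (faultList : List String) (scoreList : List Int) : Decidable (Pre_faultCountAndHighScore faultList scoreList) := by unfold Pre_faultCountAndHighScore; infer_instance
def pvWitness_faultCountAndHighScore : List String × List Int := (["a:b:c:d", "x", "p:q"], [95, 10, 50])

def Spec_faultCountAndHighScore (faultList : List String) (scoreList : List Int) (out : Int × Int × Int × Int × Int × Int × Int × Int × Int × Int × Int) : Prop := out = faultCountAndHighScore_alt faultList scoreList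
instance (faultList : List String) (scoreList : List Int) (out : Int × Int × Int × Int × Int × Int × Int × Int × Int × Int × Int) : Decidable (Spec_faultCountAndHighScore faultList scoreList out) := by
  unfold Spec_faultCountAndHighScore
  letI d2 : DecidableEq (Int × Int) := instDecidableEqProd
  letI d3 : DecidableEq (Int × Int × Int) := @instDecidableEqProd _ _ _ d2
  letI d4 : DecidableEq (Int × Int × Int × Int) := @instDecidableEqProd _ _ _ d3
  letI d5 : DecidableEq (Int × Int × Int × Int × Int) := @instDecidableEqProd _ _ _ d4
  letI d6 : DecidableEq (Int × Int × Int × Int × Int × Int) := @instDecidableEqProd _ _ _ d5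
  letI d7 : DecidableEq (Int × Int × Int × Int × Int × Int × Int) := @instDecidableEqProd _ _ _ d6
  letI d8 : DecidableEq (Int × Int × Int × Int × Int × Int × Int × Int) := @instDecidableEqProd _ _ _ d7
  letI d9 : DecidableEq (Int × Int × Int × Int × Int × Int × Int × Int × Int) := @instDecidableEqProd _ _ _ d8
  letI d10 : DecidableEq (Int × Int × Int × Int × Int × Int × Int × Int × Int × Int) := @instDecidableEqProd _ _ _ d9
  letI d11 : DecidableEq (Int × Int × Int × Int × Int × Int × Int × Int × Int × Int × Int) := @instDecidableEqProd _ _ _ d10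
  exact d11 _ _

-- ===== CLAIM (what is proved, stated in full; the proofs are below) =====
def Claim_equal_faultCountAndHighScore : Prop := ∀ (faultList : List String) (scoreList : List Int), Dom_faultCountAndHighScore faultList scoreList → Pre_faultCountAndHighScore faultList scoreList → Spec_faultCountAndHighScore faultList scoreList (faultCountAndHighScore faultList scoreList)

-- ===== LEMMAS AND PROOFS =====

-- A's loop from position ct equals B's staged counts over the remaining suffix,
-- added to the counters carried so far.
theorem pvLoop_eq (faultList : List String) (scoreList : List Int) :
    ∀ (l : List String) (ct : Nat), faultList.drop ct = l →
    ∀ (n0 n1 n2 n3 n4 n5 n6 h3 h4 h5 h6 : Int),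
    pvALoop faultList scoreList l (ct : Int) n0 n1 n2 n3 n4 n5 n6 h3 h4 h5 h6 =
      (n0 + (PySem.List.count (pvBuckets l) 0 : Int),
       n1 + (PySem.List.count (pvBuckets l) 1 : Int),
       n2 + (PySem.List.count (pvBuckets l) 2 : Int),
       n3 + (PySem.List.count (pvBuckets l) 3 : Int),
       n4 + (PySem.List.count (pvBuckets l) 4 : Int),
       n5 + (PySem.List.count (pvBuckets l) 5 : Int),
       n6 + (PySem.List.count (pvBuckets l) 6 : Int),
       h3 + pvHighSum ((pvBuckets l).zip (scoreList.drop ct)) 3,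
       h4 + pvHighSum ((pvBuckets l).zip (scoreList.drop ct)) 4,
       h5 + pvHighSum ((pvBuckets l).zip (scoreList.drop ct)) 5,
       h6 + pvHighSum ((pvBuckets l).zip (scoreList.drop ct)) 6) := by
  intro l
  induction l with
  | nil => intro ct _ n0 n1 n2 n3 n4 n5 n6 h3 h4 h5 h6; simp [pvALoop, pvBuckets, pvHighSum]
  | cons f rest ih =>
    intro ct hdrop n0 n1 n2 n3 n4 n5 n6 h3 h4 h5 h6
    have h0 : faultList[ct]? = some f := by
      have h1 : (faultList.drop ct)[0]? = some f := by rw [hdrop]; rfl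
      rwa [List.getElem?_drop, Nat.add_zero] at h1
    have hpy : PySem.List.pyGetD faultList (ct : Int) "" = f := by
      rw [PySem.List.pyGetD_natCast]; simp [List.getD, h0]
    have hrest : faultList.drop (ct + 1) = rest := by
      have h2 : (faultList.drop ct).drop 1 = rest := by simp [hdrop]
      simpa [List.drop_drop, Nat.add_comm] using h2
    have hcast : ((ct : Int) + 1) = ((ct + 1 : Nat) : Int) := by push_cast; ring
    have ihc := ih (ct + 1) hrest
    have hbk : pvBuckets (f :: rest) = min ((PySem.Str.count f ":" : Int)) 6 :: pvBuckets rest := rfl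
    -- one zip step: the pair (bucket f, scoreList[ct]) if it exists, then the tail
    have hzip : ∀ (k : Int),
        pvHighSum ((pvBuckets (f :: rest)).zip (scoreList.drop ct)) k =
          (if min ((PySem.Str.count f ":" : Int)) 6 = k ∧ PySem.List.pyGetD scoreList (ct : Int) 0 ≥ 90 then 1 else 0)
            + pvHighSum ((pvBuckets rest).zip (scoreList.drop (ct + 1))) k := by
      intro k
      by_cases hin : ct < scoreList.length
      · have hsdrop : scoreList.drop ct = scoreList[ct] :: scoreList.drop (ct + 1) :=
          List.drop_eq_getElem_cons hin
        have hspy : PySem.List.pyGetD scoreList (ct : Int) 0 = scoreList[ct] := by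
          rw [PySem.List.pyGetD_natCast]; simp [List.getD, List.getElem?_eq_getElem hin]
        rw [hbk, hsdrop, hspy]
        simp only [List.zip_cons_cons, pvHighSum, List.foldl_cons]
        split_ifs with h
        · simp only [PySem.List.foldl_ite_add_one]; ring
        · simp only [PySem.List.foldl_ite_add_one]; ring
      · have hd1 : scoreList.drop ct = [] := List.drop_eq_nil_of_le (by omega)
        have hd2 : scoreList.drop (ct + 1) = [] := List.drop_eq_nil_of_le (by omega)
        have hspy : PySem.List.pyGetD scoreList (ct : Int) 0 = 0 := by
          rw [PySem.List.pyGetD_natCast]; simp [List.getD, List.getElem?_eq_none (by omega : scoreList.length ≤ ct)]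
        rw [hd1, hd2, hspy]
        simp [pvHighSum]
    by_cases e0 : PySem.Str.count f ":" = 0
    · have hb : min ((PySem.Str.count f ":" : Int)) 6 = 0 := by rw [e0]; decide
      simp only [pvALoop, hpy, e0]
      norm_num
      rw [hcast, ihc (n0 + 1) n1 n2 n3 n4 n5 n6 h3 h4 h5 h6]
      simp only [Prod.mk.injEq, hzip]
      simp only [hbk, hb, PySem.List.count_eq, List.count_cons]
      norm_num
      omega
    by_cases e1 : PySem.Str.count f ":" = 1
    · have hb : min ((PySem.Str.count f ":" : Int)) 6 = 1 := by rw [e1]; decide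
      simp only [pvALoop, hpy, e1]
      norm_num
      rw [hcast, ihc n0 (n1 + 1) n2 n3 n4 n5 n6 h3 h4 h5 h6]
      simp only [Prod.mk.injEq, hzip]
      simp only [hbk, hb, PySem.List.count_eq, List.count_cons]
      norm_num
      omega
    by_cases e2 : PySem.Str.count f ":" = 2
    · have hb : min ((PySem.Str.count f ":" : Int)) 6 = 2 := by rw [e2]; decide
      simp only [pvALoop, hpy, e2]
      norm_num
      rw [hcast, ihc n0 n1 (n2 + 1) n3 n4 n5 n6 h3 h4 h5 h6]
      simp only [Prod.mk.injEq, hzip]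
      simp only [hbk, hb, PySem.List.count_eq, List.count_cons]
      norm_num
      omega
    by_cases e3 : PySem.Str.count f ":" = 3
    · have hb : min ((PySem.Str.count f ":" : Int)) 6 = 3 := by rw [e3]; decide
      simp only [pvALoop, hpy, e3]
      norm_num
      by_cases hs : (90:Int) ≤ scoreList[ct]?.getD 0
      · rw [if_pos hs, hcast, ihc n0 n1 n2 (n3 + 1) n4 n5 n6 (h3 + 1) h4 h5 h6]
        simp only [Prod.mk.injEq, hzip]
        simp only [hbk, hb, PySem.List.count_eq, List.count_cons,
          PySem.List.pyGetD_natCast, List.getD_eq_getElem?_getD, ge_iff_le]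
        simp only [hs]
        norm_num
        omega
      · rw [if_neg hs, hcast, ihc n0 n1 n2 (n3 + 1) n4 n5 n6 h3 h4 h5 h6]
        simp only [Prod.mk.injEq, hzip]
        simp only [hbk, hb, PySem.List.count_eq, List.count_cons,
          PySem.List.pyGetD_natCast, List.getD_eq_getElem?_getD, ge_iff_le]
        simp only [hs]
        norm_num
        omega
    by_cases e4 : PySem.Str.count f ":" = 4
    · have hb : min ((PySem.Str.count f ":" : Int)) 6 = 4 := by rw [e4]; decide
      simp only [pvALoop, hpy, e4]
      norm_num
      by_cases hs : (90:Int) ≤ scoreList[ct]?.getD 0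
      · rw [if_pos hs, hcast, ihc n0 n1 n2 n3 (n4 + 1) n5 n6 h3 (h4 + 1) h5 h6]
        simp only [Prod.mk.injEq, hzip]
        simp only [hbk, hb, PySem.List.count_eq, List.count_cons,
          PySem.List.pyGetD_natCast, List.getD_eq_getElem?_getD, ge_iff_le]
        simp only [hs]
        norm_num
        omega
      · rw [if_neg hs, hcast, ihc n0 n1 n2 n3 (n4 + 1) n5 n6 h3 h4 h5 h6]
        simp only [Prod.mk.injEq, hzip]
        simp only [hbk, hb, PySem.List.count_eq, List.count_cons,
          PySem.List.pyGetD_natCast, List.getD_eq_getElem?_getD, ge_iff_le]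
        simp only [hs]
        norm_num
        omega
    by_cases e5 : PySem.Str.count f ":" = 5
    · have hb : min ((PySem.Str.count f ":" : Int)) 6 = 5 := by rw [e5]; decide
      simp only [pvALoop, hpy, e5]
      norm_num
      by_cases hs : (90:Int) ≤ scoreList[ct]?.getD 0
      · rw [if_pos hs, hcast, ihc n0 n1 n2 n3 n4 (n5 + 1) n6 h3 h4 (h5 + 1) h6]
        simp only [Prod.mk.injEq, hzip]
        simp only [hbk, hb, PySem.List.count_eq, List.count_cons,
          PySem.List.pyGetD_natCast, List.getD_eq_getElem?_getD, ge_iff_le]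
        simp only [hs]
        norm_num
        omega
      · rw [if_neg hs, hcast, ihc n0 n1 n2 n3 n4 (n5 + 1) n6 h3 h4 h5 h6]
        simp only [Prod.mk.injEq, hzip]
        simp only [hbk, hb, PySem.List.count_eq, List.count_cons,
          PySem.List.pyGetD_natCast, List.getD_eq_getElem?_getD, ge_iff_le]
        simp only [hs]
        norm_num
        omega
    · have e6 : 5 < PySem.Str.count f ":" := by omega
      have hb : min ((PySem.Str.count f ":" : Int)) 6 = 6 :=
        min_eq_right (by exact_mod_cast (by omega : 6 ≤ PySem.Str.count f ":"))
      simp only [pvALoop, hpy, if_neg e0, if_neg e1, if_neg e2, if_neg e3, if_neg e4, if_neg e5, if_pos e6]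
      norm_num
      by_cases hs : (90:Int) ≤ scoreList[ct]?.getD 0
      · rw [if_pos hs, hcast, ihc n0 n1 n2 n3 n4 n5 (n6 + 1) h3 h4 h5 (h6 + 1)]
        simp only [Prod.mk.injEq, hzip]
        simp only [hbk, hb, PySem.List.count_eq, List.count_cons,
          PySem.List.pyGetD_natCast, List.getD_eq_getElem?_getD, ge_iff_le]
        simp only [hs]
        norm_num
        omega
      · rw [if_neg hs, hcast, ihc n0 n1 n2 n3 n4 n5 (n6 + 1) h3 h4 h5 h6]
        simp only [Prod.mk.injEq, hzip]
        simp only [hbk, hb, PySem.List.count_eq, List.count_cons,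
          PySem.List.pyGetD_natCast, List.getD_eq_getElem?_getD, ge_iff_le]
        simp only [hs]
        norm_num
        omega

-- ===== VERDICT (by name: the statement is the Claim_ definition above) =====
theorem faultCountAndHighScore_spec : Claim_equal_faultCountAndHighScore := by
  intro faultList scoreList _ _
  unfold Spec_faultCountAndHighScore faultCountAndHighScore faultCountAndHighScore_alt
  simpa using pvLoop_eq faultList scoreList faultList 0 rfl 0 0 0 0 0 0 0 0 0 0 0
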